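-- pv_equiv track=rewrite | github.com/punkryn/ryu_algo | 0524/카드섞기.py | go
-- ===== SOURCE A (Python) =====
-- def go(cur, depth, k):
--     if len(cur) == 1:
--         return cur
--
--     length = len(cur)
--     ret = []
--     sp = length - (2 ** (k - depth + 1))
--     ret += go(cur[sp:], depth + 1, k) + cur[:sp]
--     return ret
-- ===== SOURCE B (Python) =====
-- def go(cur, depth, k):
--     # Iterative: peel off prefixes, then concatenate them back in reverse order.
--     prefixes = []
--     while len(cur) != 1:
--         sp = len(cur) - 2 ** (k - depth + 1)
--         prefixes.append(cur[:sp])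
--         cur = cur[sp:]
--         depth += 1
--     result = cur
--     for p in reversed(prefixes):
--         result = result + p
--     return result
-- ===== Notes on version B (the rewrite author's own statement) =====
-- stated objective: alternative
-- what changed: Replaced A's recursion (which builds the result on the way back up) by an iterative loop that collects the stripped prefixes in a list and concatenates them back in reverse insertion order after the loop.
import Mathlib
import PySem

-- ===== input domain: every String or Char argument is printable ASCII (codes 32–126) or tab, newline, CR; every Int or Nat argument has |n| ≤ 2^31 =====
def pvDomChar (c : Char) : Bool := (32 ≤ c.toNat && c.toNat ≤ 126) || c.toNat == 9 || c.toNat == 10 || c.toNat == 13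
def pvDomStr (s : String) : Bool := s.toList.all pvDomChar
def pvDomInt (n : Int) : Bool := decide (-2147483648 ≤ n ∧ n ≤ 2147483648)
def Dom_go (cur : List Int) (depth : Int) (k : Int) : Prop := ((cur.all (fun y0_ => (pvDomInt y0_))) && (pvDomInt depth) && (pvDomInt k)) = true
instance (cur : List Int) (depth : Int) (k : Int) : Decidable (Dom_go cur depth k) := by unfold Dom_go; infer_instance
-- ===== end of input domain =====

-- B replaces A's build-on-the-way-back-up recursion by an iterative loop that collects the
-- stripped prefixes and concatenates them back in reverse order after the loop (alternative
-- decomposition, same cost).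

-- ===== PORT A =====
-- On the 'else []' branch Python raises a TypeError (2 ** negative is a float, which cannot
-- index a slice); that branch is excluded by Pre_go, the guard only makes the recursion total.
def go (cur : List Int) (depth : Int) (k : Int) : List Int :=
  if cur.length = 1 then cur
  else if _h : depth ≤ k + 1 then
    let length : Int := (cur.length : Int)
    let sp : Int := length - 2 ^ (k - depth + 1).toNat
    go (PySem.List.slice cur (some sp) none) (depth + 1) k ++ PySem.List.slice cur none (some sp)
  else []
termination_by (k + 2 - depth).toNat
decreasing_by omega

-- ===== PORT B =====
-- the while-loop of Source B: returns (prefixes, cur) when len(cur) == 1; the same totality guard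
-- covers the inputs where Source B's loop body would raise (outside Pre_go).
def goAltLoop (cur : List Int) (depth : Int) (k : Int) (prefixes : List (List Int)) :
    List (List Int) × List Int :=
  if cur.length = 1 then (prefixes, cur)
  else if _h : depth ≤ k + 1 then
    let sp : Int := (cur.length : Int) - 2 ^ (k - depth + 1).toNat
    goAltLoop (PySem.List.slice cur (some sp) none) (depth + 1) k
      (prefixes ++ [PySem.List.slice cur none (some sp)])
  else (prefixes, cur)
termination_by (k + 2 - depth).toNat
decreasing_by omega

def go_alt (cur : List Int) (depth : Int) (k : Int) : List Int :=
  let st := goAltLoop cur depth k []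
  st.1.reverse.foldl (· ++ ·) st.2

-- ===== PRECONDITION & SPEC =====
-- Pre_go: exactly the inputs on which the Python A returns: a singleton returns at once;
-- otherwise cur must be nonempty and depth ≤ k+1 (else A eventually hits 2 ** negative,
-- a float, and raises TypeError; the empty list recurses on itself until that point).
def Pre_go (cur : List Int) (depth : Int) (k : Int) : Prop :=
  cur ≠ [] ∧ (cur.length = 1 ∨ depth ≤ k + 1)
instance (cur : List Int) (depth : Int) (k : Int) : Decidable (Pre_go cur depth k) := by
  unfold Pre_go; infer_instance

def pvWitness_go : List Int × Int × Int := ([3, 1, 2, 4], 1, 2)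

def Spec_go (cur : List Int) (depth : Int) (k : Int) (out : List Int) : Prop :=
  out = go_alt cur depth k
instance (cur : List Int) (depth : Int) (k : Int) (out : List Int) :
    Decidable (Spec_go cur depth k out) := by unfold Spec_go; infer_instance

-- ===== CLAIM (what is proved, stated in full; the proofs are below) =====
def Claim_equal_go : Prop := ∀ (cur : List Int) (depth : Int) (k : Int),
    Dom_go cur depth k → Pre_go cur depth k → Spec_go cur depth k (go cur depth k)

-- ===== LEMMAS AND PROOFS =====

theorem foldl_append_eq_flatten (l : List (List Int)) (b : List Int) :
    l.foldl (· ++ ·) b = b ++ l.flatten := by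
  induction l generalizing b with
  | nil => simp
  | cons x xs ih => simp [List.foldl_cons, ih, List.append_assoc]

theorem goAltLoop_main (n : Nat) : ∀ (cur : List Int) (depth k : Int) (ps : List (List Int)),
    (k + 2 - depth).toNat ≤ n → cur ≠ [] → (cur.length = 1 ∨ depth ≤ k + 1) →
    (goAltLoop cur depth k ps).1.reverse.foldl (· ++ ·) (goAltLoop cur depth k ps).2
      = go cur depth k ++ ps.reverse.flatten := by
  induction n with
  | zero =>
    intro cur depth k ps hn hne hpre
    -- measure 0 forces depth > k+1, so cur.length = 1
    rcases hpre with h1 | h2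
    · rw [goAltLoop, go]
      simp only [h1, if_pos]
      exact foldl_append_eq_flatten _ _
    · exfalso; omega
  | succ n ih =>
    intro cur depth k ps hn hne hpre
    by_cases h1 : cur.length = 1
    · rw [goAltLoop, go]
      simp only [h1, if_pos]
      exact foldl_append_eq_flatten _ _
    · have hdk : depth ≤ k + 1 := by tauto
      rw [goAltLoop, go]
      simp only [h1, if_false, hdk, dif_pos]
      have hL : 1 ≤ cur.length := by
        cases cur with
        | nil => exact absurd rfl hne
        | cons a t => simp
      set sp : Int := (cur.length : Int) - 2 ^ (k - depth + 1).toNat with hsp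
      have hP : (1 : Int) ≤ 2 ^ (k - depth + 1).toNat := one_le_pow₀ (by norm_num)
      set rest : List Int := PySem.List.slice cur (some sp) none with hrest
      have hclt : PySem.List.clampIdx cur.length sp < cur.length := by
        have := PySem.List.clampIdx_le cur.length sp
        simp only [PySem.List.clampIdx]
        split_ifs with hneg <;> omega
      have hrestlen : rest.length = cur.length - PySem.List.clampIdx cur.length sp := by
        rw [hrest, PySem.List.slice_some_none, List.length_drop]
      have hrestne : rest ≠ [] := by
        intro hcon
        rw [hcon] at hrestlen
        simp at hrestlen
        omega
      have hrestpre : rest.length = 1 ∨ depth + 1 ≤ k + 1 := by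
        by_cases hdk2 : depth + 1 ≤ k + 1
        · exact Or.inr hdk2
        · left
          have hdeq : depth = k + 1 := by omega
          have htz : (k - depth + 1).toNat = 0 := by omega
          have hPeq : (2 : Int) ^ (k - depth + 1).toNat = 1 := by rw [htz]; norm_num
          have hspv : sp = (cur.length : Int) - 1 := by rw [hsp, hPeq]
          have hclamp : PySem.List.clampIdx cur.length sp = cur.length - 1 := by
            simp only [PySem.List.clampIdx]
            split_ifs with hneg <;> omega
          omega
      have hmeas : (k + 2 - (depth + 1)).toNat ≤ n := by omega
      have hrec := ih rest (depth + 1) k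
        (ps ++ [PySem.List.slice cur none (some sp)]) hmeas hrestne hrestpre
      rw [hrec]
      simp [List.append_assoc]

-- ===== VERDICT (by name: the statement is the Claim_ definition above) =====
theorem go_spec : Claim_equal_go := by
  intro cur depth k _hdom hpre
  unfold Spec_go go_alt
  obtain ⟨hne, hcond⟩ := hpre
  have := goAltLoop_main (k + 2 - depth).toNat cur depth k [] le_rfl hne hcond
  simpa using this.symm
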